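-- pv_equiv track=rewrite | github.com/moonshine-ai/moonshine-g2p2 | turkish_numbers.py | expand_cardinal_digits_to_turkish_words
-- ===== SOURCE A (Python) =====
-- _DIGIT_WORD = (
--     "sıfır",
--     "bir",
--     "iki",
--     "üç",
--     "dört",
--     "beş",
--     "altı",
--     "yedi",
--     "sekiz",
--     "dokuz",
-- )
--
-- _TENS = (
--     "",
--     "",
--     "yirmi",
--     "otuz",
--     "kırk",
--     "elli",
--     "altmış",
--     "yetmiş",
--     "seksen",
--     "doksan",
-- )
--
-- def _under_100(n: int) -> list[str]:
--     if n < 0 or n >= 100: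
--         raise ValueError(n)
--     if n < 10:
--         return [_DIGIT_WORD[n]]
--     if n == 10:
--         return ["on"]
--     if n < 20:
--         return ["on", _DIGIT_WORD[n - 10]]
--     t, u = divmod(n, 10)
--     tn = _TENS[t]
--     if u == 0:
--         return [tn]
--     return [tn, _DIGIT_WORD[u]]
--
-- def _tokens_0_999(n: int) -> list[str]:
--     if n < 0 or n > 999:
--         raise ValueError(n)
--     if n == 0:
--         return ["sıfır"]
--     h, r = divmod(n, 100)
--     parts: list[str] = []
--     if h > 0:
--         if h == 1:
--             parts.append("yüz")
--         else:
--             parts.extend([_DIGIT_WORD[h], "yüz"])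
--         if r == 0:
--             return parts
--     return parts + _under_100(r)
--
-- def _below_1_000_000_tokens(n: int) -> list[str]:
--     if n < 0 or n >= 1_000_000:
--         raise ValueError(n)
--     if n < 1000:
--         return _tokens_0_999(n)
--     q, r = divmod(n, 1000)
--     if q == 1:
--         left = ["bin"]
--     else:
--         left = _tokens_0_999(q) + ["bin"]
--     if r == 0:
--         return left
--     return left + _tokens_0_999(r)
--
-- def expand_cardinal_digits_to_turkish_words(s: str) -> str:
--     if not s.isdigit():
--         return s
--     if len(s) > 1 and s[0] == "0":
--         return " ".join(_DIGIT_WORD[int(c)] for c in s)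
--     n = int(s)
--     if n > 999_999:
--         return s
--     if n == 0:
--         return "sıfır"
--     return " ".join(_below_1_000_000_tokens(n))
-- ===== SOURCE B (Python) =====
-- _UNITS = ("sıfır", "bir", "iki", "üç", "dört", "beş", "altı", "yedi", "sekiz", "dokuz")
-- _TENS_WORD = ("", "on", "yirmi", "otuz", "kırk", "elli", "altmış", "yetmiş", "seksen", "doksan")
--
-- def _chunk_tokens(h: int, t: int, u: int) -> list[str]:
--     # tokens of one non-zero 3-digit chunk, read positionally off lookup tables
--     toks: list[str] = []
--     if h == 1:
--         toks.append("yüz")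
--     elif h > 1:
--         toks.append(_UNITS[h])
--         toks.append("yüz")
--     if t > 0:
--         toks.append(_TENS_WORD[t])
--     if u > 0:
--         toks.append(_UNITS[u])
--     return toks
--
-- def _six_digit_tokens(n: int) -> list[str]:
--     # split n (1..999999) into its six decimal digits and emit chunk tokens positionally
--     d0 = n // 100_000 % 10
--     d1 = n // 10_000 % 10
--     d2 = n // 1_000 % 10
--     d3 = n // 100 % 10
--     d4 = n // 10 % 10
--     d5 = n % 10
--     out: list[str] = []
--     if not (d0 == 0 and d1 == 0 and d2 == 0):
--         if not (d0 == 0 and d1 == 0 and d2 == 1):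
--             out.extend(_chunk_tokens(d0, d1, d2))
--         out.append("bin")
--     if not (d3 == 0 and d4 == 0 and d5 == 0):
--         out.extend(_chunk_tokens(d3, d4, d5))
--     return out
--
-- def expand_cardinal_digits_to_turkish_words(s: str) -> str:
--     if not s.isdigit():
--         return s
--     if len(s) > 1 and s[0] == "0":
--         return " ".join(_UNITS[int(c)] for c in s)
--     n = int(s)
--     if n > 999_999:
--         return s
--     if n == 0:
--         return "sıfır"
--     return " ".join(_six_digit_tokens(n))
-- ===== Notes on version B (the rewrite author's own statement) =====
-- stated objective: alternative
-- what changed: Replaces A's chain of range-checked divmod helpers (_under_100/_tokens_0_999/_below_1_000_000_tokens with teen and bare-ten/bare-hundred special cases) by a flat positional scheme: n is split once into its six decimal digits and each non-zero 3-digit chunk is emitted from place-indexed lookup tables (the tens table carries the ten-word at index 1, which removes the teen special case), with the thousands marker appended after the thousands chunk and that chunk's leading unit word suppressed exactly when the chunk is 001; …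
import Mathlib
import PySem

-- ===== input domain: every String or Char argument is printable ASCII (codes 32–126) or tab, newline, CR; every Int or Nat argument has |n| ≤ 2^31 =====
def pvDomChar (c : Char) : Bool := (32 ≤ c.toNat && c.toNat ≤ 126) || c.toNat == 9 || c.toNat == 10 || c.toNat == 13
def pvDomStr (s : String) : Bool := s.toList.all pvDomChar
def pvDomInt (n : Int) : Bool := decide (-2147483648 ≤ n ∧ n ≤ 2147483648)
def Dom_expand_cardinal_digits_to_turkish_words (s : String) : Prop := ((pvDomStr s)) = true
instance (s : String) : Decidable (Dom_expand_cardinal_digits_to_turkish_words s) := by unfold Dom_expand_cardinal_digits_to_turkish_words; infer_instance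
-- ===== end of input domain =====

-- ===== PORT A =====
-- B differs from A only in the number-to-words core; the wrapper (isdigit test, digit
-- spelling of leading-zero strings, range test) is the same by design.
def pvDigitWord : List String :=
  ["sıfır", "bir", "iki", "üç", "dört", "beş", "altı", "yedi", "sekiz", "dokuz"]

def pvTens : List String :=
  ["", "", "yirmi", "otuz", "kırk", "elli", "altmış", "yetmiş", "seksen", "doksan"]

-- _under_100; the ValueError branch (unreachable from the entry point) is modelled as []
def pvUnder100 (n : Int) : List String :=
  if n < 0 ∨ 100 ≤ n then []
  else if n < 10 then [PySem.List.pyGetD pvDigitWord n ""]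
  else if n = 10 then ["on"]
  else if n < 20 then ["on", PySem.List.pyGetD pvDigitWord (n - 10) ""]
  else
    let t := PySem.Int.floordiv n 10
    let u := PySem.Int.mod n 10
    let tn := PySem.List.pyGetD pvTens t ""
    if u = 0 then [tn] else [tn, PySem.List.pyGetD pvDigitWord u ""]

-- _tokens_0_999; the ValueError branch is modelled as []
def pvTokens0_999 (n : Int) : List String :=
  if n < 0 ∨ 999 < n then []
  else if n = 0 then ["sıfır"]
  else
    let h := PySem.Int.floordiv n 100
    let r := PySem.Int.mod n 100
    let parts := if 0 < h then (if h = 1 then ["yüz"] else [PySem.List.pyGetD pvDigitWord h "", "yüz"]) else []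
    if 0 < h ∧ r = 0 then parts else parts ++ pvUnder100 r

-- _below_1_000_000_tokens; the ValueError branch is modelled as []
def pvBelow1M (n : Int) : List String :=
  if n < 0 ∨ 1000000 ≤ n then []
  else if n < 1000 then pvTokens0_999 n
  else
    let q := PySem.Int.floordiv n 1000
    let r := PySem.Int.mod n 1000
    let left := if q = 1 then ["bin"] else pvTokens0_999 q ++ ["bin"]
    if r = 0 then left else left ++ pvTokens0_999 r

def expand_cardinal_digits_to_turkish_words (s : String) : String :=
  if ¬ PySem.Str.strIsdigit s then s
  else if 1 < PySem.Str.len s ∧ PySem.Str.pyGet? s 0 = some '0' then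
    -- " ".join(_DIGIT_WORD[int(c)] for c in s); int(c) always succeeds here (c is a digit)
    PySem.Str.join " " (s.toList.map fun c => PySem.List.pyGetD pvDigitWord ((PySem.Int.ofChars? [c]).getD 0) "")
  else
    let n := (PySem.Int.ofStr? s).getD 0   -- int(s); s.isdigit() guarantees a value
    if 999999 < n then s
    else if n = 0 then "sıfır"
    else PySem.Str.join " " (pvBelow1M n)

-- ===== PORT B =====
def pvUnits : List String :=
  ["sıfır", "bir", "iki", "üç", "dört", "beş", "altı", "yedi", "sekiz", "dokuz"]

def pvTensWord : List String :=
  ["", "on", "yirmi", "otuz", "kırk", "elli", "altmış", "yetmiş", "seksen", "doksan"]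

-- _chunk_tokens: tokens of one non-zero 3-digit chunk, read positionally
def pvChunkTokens (h t u : Int) : List String :=
  (if h = 1 then ["yüz"] else if 1 < h then [PySem.List.pyGetD pvUnits h "", "yüz"] else [])
    ++ (if 0 < t then [PySem.List.pyGetD pvTensWord t ""] else [])
    ++ (if 0 < u then [PySem.List.pyGetD pvUnits u ""] else [])

-- _six_digit_tokens: split n into its six decimal digits and emit chunk tokens positionally
def pvSixDigitTokens (n : Int) : List String :=
  let d0 := PySem.Int.mod (PySem.Int.floordiv n 100000) 10
  let d1 := PySem.Int.mod (PySem.Int.floordiv n 10000) 10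
  let d2 := PySem.Int.mod (PySem.Int.floordiv n 1000) 10
  let d3 := PySem.Int.mod (PySem.Int.floordiv n 100) 10
  let d4 := PySem.Int.mod (PySem.Int.floordiv n 10) 10
  let d5 := PySem.Int.mod n 10
  (if ¬(d0 = 0 ∧ d1 = 0 ∧ d2 = 0) then
      (if ¬(d0 = 0 ∧ d1 = 0 ∧ d2 = 1) then pvChunkTokens d0 d1 d2 else []) ++ ["bin"]
    else [])
    ++ (if ¬(d3 = 0 ∧ d4 = 0 ∧ d5 = 0) then pvChunkTokens d3 d4 d5 else [])

def expand_cardinal_digits_to_turkish_words_alt (s : String) : String :=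
  if ¬ PySem.Str.strIsdigit s then s
  else if 1 < PySem.Str.len s ∧ PySem.Str.pyGet? s 0 = some '0' then
    PySem.Str.join " " (s.toList.map fun c => PySem.List.pyGetD pvUnits ((PySem.Int.ofChars? [c]).getD 0) "")
  else
    let n := (PySem.Int.ofStr? s).getD 0   -- int(s); s.isdigit() guarantees a value
    if 999999 < n then s
    else if n = 0 then "sıfır"
    else PySem.Str.join " " (pvSixDigitTokens n)

-- ===== PRECONDITION & SPEC =====
def Spec_expand_cardinal_digits_to_turkish_words (s : String) (out : String) : Prop := out = expand_cardinal_digits_to_turkish_words_alt s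
instance (s : String) (out : String) : Decidable (Spec_expand_cardinal_digits_to_turkish_words s out) := by unfold Spec_expand_cardinal_digits_to_turkish_words; infer_instance

-- ===== CLAIM (what is proved, stated in full; the proofs are below) =====
def Claim_equal_expand_cardinal_digits_to_turkish_words : Prop := ∀ (s : String), Dom_expand_cardinal_digits_to_turkish_words s → Spec_expand_cardinal_digits_to_turkish_words s (expand_cardinal_digits_to_turkish_words s)

-- ===== LEMMAS AND PROOFS =====

-- int(cs) of a pure digit string is never negative (digitsVal? is kept opaque: only its Option shape is used)
theorem pv_getD_bind_nonneg (o : Option Nat) :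
    0 ≤ (Option.map (fun n : Int => n) (do let a ← o; pure ((a : Int)))).getD 0 := by
  cases o <;> simp

theorem pv_digit_not_space (c : Char) (hd : PySem.Chars.isdigit c = true) :
    PySem.Int.isIntSpace c = false := by
  simp [PySem.Chars.isdigit, Char.le_def, UInt32.le_iff_toNat_le] at hd
  simp [PySem.Int.isIntSpace, Char.ext_iff, UInt32.ext_iff]
  omega

theorem pv_ofChars_nonneg (cs : List Char) (h : PySem.Chars.strIsdigit cs = true) :
    0 ≤ (PySem.Int.ofChars? cs).getD 0 := by
  have hall : ∀ c ∈ cs, PySem.Chars.isdigit c = true := by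
    simp [PySem.Chars.strIsdigit, List.all_eq_true] at h; exact h.2
  have hds : ∀ c ∈ cs, PySem.Int.isIntSpace c = false := fun c hc => pv_digit_not_space c (hall c hc)
  have h1 : List.dropWhile PySem.Int.isIntSpace cs = cs := by
    rw [List.dropWhile_eq_self_iff]; intro h
    simp [hds _ (List.getElem_mem h)]
  have h2 : List.dropWhile PySem.Int.isIntSpace cs.reverse = cs.reverse := by
    rw [List.dropWhile_eq_self_iff]; intro h
    rw [Bool.not_eq_true]
    exact hds _ (by rw [← List.mem_reverse]; exact List.getElem_mem h)
  simp only [PySem.Int.ofChars?, h1, h2, List.reverse_reverse]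
  split
  · have : PySem.Chars.isdigit '-' = true := hall '-' (by simp)
    simp [PySem.Chars.isdigit] at this
  · have : PySem.Chars.isdigit '+' = true := hall '+' (by simp)
    simp [PySem.Chars.isdigit] at this
  · exact pv_getD_bind_nonneg _

-- A's divmod chunk words coincide with B's positional chunk words, for every chunk 1..999
set_option maxHeartbeats 4000000 in
set_option maxRecDepth 10000 in
theorem pv_chunk_key : ∀ m : Nat, m < 1000 → 1 ≤ m →
    pvTokens0_999 (m : Int) =
      pvChunkTokens ((m / 100 % 10 : Nat) : Int) ((m / 10 % 10 : Nat) : Int) ((m % 10 : Nat) : Int) := by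
  decide

theorem pv_chunk_eq (m : Int) (h1 : 1 ≤ m) (h2 : m ≤ 999) :
    pvTokens0_999 m = pvChunkTokens (m / 100 % 10) (m / 10 % 10) (m % 10) := by
  obtain ⟨k, hk⟩ : ∃ k : Nat, (k : Int) = m := ⟨m.toNat, by omega⟩
  subst hk
  have e0 : (k : Int) / 100 % 10 = ((k / 100 % 10 : Nat) : Int) := by omega
  have e1 : (k : Int) / 10 % 10 = ((k / 10 % 10 : Nat) : Int) := by omega
  have e2 : (k : Int) % 10 = ((k % 10 : Nat) : Int) := by omega
  rw [e0, e1, e2]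
  exact pv_chunk_key k (by omega) (by omega)

theorem pv_tokens_eq (n : Int) (h1 : 1 ≤ n) (h2 : n ≤ 999999) :
    pvBelow1M n = pvSixDigitTokens n := by
  unfold pvBelow1M pvSixDigitTokens
  have ediv : ∀ b : Int, 0 < b → ∀ a : Int, PySem.Int.floordiv a b = a / b :=
    fun b hb a => PySem.Int.floordiv_eq_ediv_of_pos hb
  have emod : ∀ b : Int, 0 < b → ∀ a : Int, PySem.Int.mod a b = a % b :=
    fun b hb a => PySem.Int.mod_eq_emod_of_pos hb
  simp only [ediv 1000 (by norm_num), ediv 100000 (by norm_num), ediv 10000 (by norm_num),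
    ediv 100 (by norm_num), ediv 10 (by norm_num),
    emod 1000 (by norm_num), emod 10 (by norm_num)]
  rw [if_neg (by omega)]
  by_cases hsm : n < 1000
  · rw [if_pos hsm]
    have hd0 : n / 100000 % 10 = 0 := by omega
    have hd1 : n / 10000 % 10 = 0 := by omega
    have hd2 : n / 1000 % 10 = 0 := by omega
    rw [hd0, hd1, hd2, if_neg (by simp), if_pos (by omega)]
    simpa using pv_chunk_eq n h1 (by omega)
  · rw [if_neg hsm]
    have hq1 : 1 ≤ n / 1000 := by omega
    have hq9 : n / 1000 ≤ 999 := by omega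
    have hth : ¬(n / 100000 % 10 = 0 ∧ n / 10000 % 10 = 0 ∧ n / 1000 % 10 = 0) := by omega
    rw [if_pos hth]
    have hleft : (if n / 1000 = 1 then ["bin"] else pvTokens0_999 (n / 1000) ++ ["bin"]) =
        (if ¬(n / 100000 % 10 = 0 ∧ n / 10000 % 10 = 0 ∧ n / 1000 % 10 = 1) then
            pvChunkTokens (n / 100000 % 10) (n / 10000 % 10) (n / 1000 % 10)
          else []) ++ ["bin"] := by
      by_cases hq : n / 1000 = 1
      · rw [if_pos hq, if_neg (by omega)]
        simp
      · rw [if_neg hq, if_pos (by omega)]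
        have e0 : n / 100000 % 10 = n / 1000 / 100 % 10 := by omega
        have e1 : n / 10000 % 10 = n / 1000 / 10 % 10 := by omega
        have e2 : n / 1000 % 10 = n / 1000 % 10 := rfl
        rw [e0, e1]
        rw [pv_chunk_eq (n / 1000) hq1 hq9]
    by_cases hr : n % 1000 = 0
    · rw [if_pos hr]
      rw [if_neg (by omega : ¬¬(n / 100 % 10 = 0 ∧ n / 10 % 10 = 0 ∧ n % 10 = 0))]
      rw [hleft, List.append_nil]
    · rw [if_neg hr]
      rw [if_pos (by omega : ¬(n / 100 % 10 = 0 ∧ n / 10 % 10 = 0 ∧ n % 10 = 0))]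
      rw [hleft]
      have hr1 : 1 ≤ n % 1000 := by omega
      have e3 : n / 100 % 10 = n % 1000 / 100 % 10 := by omega
      have e4 : n / 10 % 10 = n % 1000 / 10 % 10 := by omega
      have e5 : n % 10 = n % 1000 % 10 := by omega
      rw [e3, e4, e5, pv_chunk_eq (n % 1000) hr1 (by omega)]

-- ===== VERDICT (by name: the statement is the Claim_ definition above) =====
theorem expand_cardinal_digits_to_turkish_words_spec : Claim_equal_expand_cardinal_digits_to_turkish_words := by
  intro s _
  unfold Spec_expand_cardinal_digits_to_turkish_words
  unfold expand_cardinal_digits_to_turkish_words expand_cardinal_digits_to_turkish_words_alt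
  by_cases hd : PySem.Str.strIsdigit s
  · simp only [hd, not_true_eq_false, if_false]
    by_cases hz : 1 < PySem.Str.len s ∧ PySem.Str.pyGet? s 0 = some '0'
    · rw [if_pos hz, if_pos hz]
      simp only [pvDigitWord, pvUnits]
    · rw [if_neg hz, if_neg hz]
      have hn0 : 0 ≤ (PySem.Int.ofStr? s).getD 0 := by
        have : PySem.Chars.strIsdigit s.toList = true := hd
        simpa [PySem.Int.ofStr?] using pv_ofChars_nonneg s.toList this
      by_cases hbig : 999999 < (PySem.Int.ofStr? s).getD 0
      · rw [if_pos hbig, if_pos hbig]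
      · rw [if_neg hbig, if_neg hbig]
        by_cases h0 : (PySem.Int.ofStr? s).getD 0 = 0
        · rw [if_pos h0, if_pos h0]
        · rw [if_neg h0, if_neg h0]
          rw [pv_tokens_eq _ (by omega) (by omega)]
  · simp only [PySem.Str.strIsdigit] at hd
    simp [hd]
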